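-- pv_equiv track=rewrite | github.com/Suyash121212/E-WMEAP | backend/modules/directory_scanner.py | _build_risk_summary
-- ===== SOURCE A (Python) =====
-- def _build_risk_summary(findings: list, overall: str) -> str:
--     if not findings:
--         return "No sensitive paths or directories found."
--
--     critical = [f for f in findings if f["severity"] == "Critical"]
--     high     = [f for f in findings if f["severity"] == "High"]
--
--     parts = []
--     if critical:
--         names = ", ".join(f["path"] for f in critical[:3])
--         parts.append(f"{len(critical)} critical path(s) exposed: {names}")
--     if high:
--         parts.append(f"{len(high)} high-severity path(s) found")
--
--     git_found = any("/.git" in f["path"] for f in findings)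
--     env_found = any("/.env" in f["path"] for f in findings)
--
--     if git_found:
--         parts.append("source code reconstruction possible via .git")
--     if env_found:
--         parts.append("credentials may be exposed via .env")
--
--     return ". ".join(parts) + "." if parts else f"{len(findings)} paths found."
-- ===== SOURCE B (Python) =====
-- def _build_risk_summary(findings: list, overall: str) -> str:
--     if not findings:
--         return "No sensitive paths or directories found."
--
--     n_crit = 0
--     n_high = 0
--     crit_names = []
--     git_found = False
--     env_found = False
--     for f in findings:
--         sev = f["severity"]
--         path = f["path"]
--         if sev == "Critical":
--             n_crit += 1
--             if len(crit_names) < 3: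
--                 crit_names.append(path)
--         elif sev == "High":
--             n_high += 1
--         git_found = git_found or "/.git" in path
--         env_found = env_found or "/.env" in path
--
--     parts = []
--     if n_crit:
--         parts.append(f"{n_crit} critical path(s) exposed: {', '.join(crit_names)}")
--     if n_high:
--         parts.append(f"{n_high} high-severity path(s) found")
--     if git_found:
--         parts.append("source code reconstruction possible via .git")
--     if env_found:
--         parts.append("credentials may be exposed via .env")
--
--     return ". ".join(parts) + "." if parts else f"{len(findings)} paths found."
-- ===== Notes on version B (the rewrite author's own statement) =====
-- stated objective: alternative
-- what changed: B replaces A's four independent scans of findings (two list-comprehension filters, a slice+join, and two any() substring scans) by one single pass that maintains a critical counter, the first-three critical path names, a high counter and the two substring flags, then builds the same parts list.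
import Mathlib
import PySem

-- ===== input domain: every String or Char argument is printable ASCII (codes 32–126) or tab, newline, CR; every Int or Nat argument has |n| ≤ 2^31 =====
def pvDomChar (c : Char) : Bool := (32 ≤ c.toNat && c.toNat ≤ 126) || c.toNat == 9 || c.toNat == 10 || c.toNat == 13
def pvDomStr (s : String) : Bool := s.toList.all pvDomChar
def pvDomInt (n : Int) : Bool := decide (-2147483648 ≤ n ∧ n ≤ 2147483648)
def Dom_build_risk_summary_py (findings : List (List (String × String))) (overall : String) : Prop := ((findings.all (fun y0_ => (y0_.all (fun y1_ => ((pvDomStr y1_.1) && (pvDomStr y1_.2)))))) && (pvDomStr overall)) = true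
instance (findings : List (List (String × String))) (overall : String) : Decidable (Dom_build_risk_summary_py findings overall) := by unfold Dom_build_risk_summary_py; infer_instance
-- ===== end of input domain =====

-- B merges A's four independent scans of findings into one single pass (alternative decomposition, same cost);
-- Pre_ restricts to findings whose elements all carry "severity" and "path" keys (A raises KeyError otherwise,
-- except when its any() scans happen to short-circuit — see the excluded cite — and B always raises there).


-- ===== PORT A =====
-- f["k"] on the association list: first match (Pre_ guarantees the key is present)
def pvGet (f : List (String × String)) (k : String) : String := (f.lookup k).getD ""

def build_risk_summary_py (findings : List (List (String × String))) (overall : String) : String :=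
  if findings.isEmpty then "No sensitive paths or directories found."
  else
    let critical := findings.filter (fun f => pvGet f "severity" == "Critical")
    let high := findings.filter (fun f => pvGet f "severity" == "High")
    let parts : List String := []
    let parts := if !critical.isEmpty then
        parts ++ [PySem.Int.toStr (critical.length : Int) ++ " critical path(s) exposed: " ++
          PySem.Str.join ", " ((PySem.List.slice critical none (some 3)).map (fun f => pvGet f "path"))]
      else parts
    let parts := if !high.isEmpty then
        parts ++ [PySem.Int.toStr (high.length : Int) ++ " high-severity path(s) found"]
      else parts
    let git_found := findings.any (fun f => PySem.Str.isIn "/.git" (pvGet f "path"))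
    let env_found := findings.any (fun f => PySem.Str.isIn "/.env" (pvGet f "path"))
    let parts := if git_found then parts ++ ["source code reconstruction possible via .git"] else parts
    let parts := if env_found then parts ++ ["credentials may be exposed via .env"] else parts
    if !parts.isEmpty then PySem.Str.join ". " parts ++ "."
    else PySem.Int.toStr (findings.length : Int) ++ " paths found."

-- ===== PORT B =====
-- the single-pass loop body of Source B: (n_crit, n_high, crit_names, git_found, env_found)
def pvStep (st : Int × Int × List String × Bool × Bool) (f : List (String × String)) :
    Int × Int × List String × Bool × Bool :=
  match st with
  | (nc, nh, names, g, e) =>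
    let sev := pvGet f "severity"
    let path := pvGet f "path"
    if sev == "Critical" then
      (nc + 1, nh, (if names.length < 3 then names ++ [path] else names),
       g || PySem.Str.isIn "/.git" path, e || PySem.Str.isIn "/.env" path)
    else if sev == "High" then
      (nc, nh + 1, names, g || PySem.Str.isIn "/.git" path, e || PySem.Str.isIn "/.env" path)
    else
      (nc, nh, names, g || PySem.Str.isIn "/.git" path, e || PySem.Str.isIn "/.env" path)

def build_risk_summary_py_alt (findings : List (List (String × String))) (overall : String) : String :=
  if findings.isEmpty then "No sensitive paths or directories found."
  else
    match findings.foldl pvStep (0, 0, [], false, false) with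
    | (nc, nh, names, git_found, env_found) =>
      let parts : List String := []
      let parts := if nc ≠ 0 then
          parts ++ [PySem.Int.toStr nc ++ " critical path(s) exposed: " ++ PySem.Str.join ", " names]
        else parts
      let parts := if nh ≠ 0 then
          parts ++ [PySem.Int.toStr nh ++ " high-severity path(s) found"]
        else parts
      let parts := if git_found then parts ++ ["source code reconstruction possible via .git"] else parts
      let parts := if env_found then parts ++ ["credentials may be exposed via .env"] else parts
      if !parts.isEmpty then PySem.Str.join ". " parts ++ "."
      else PySem.Int.toStr (findings.length : Int) ++ " paths found."

-- ===== PRECONDITION & SPEC =====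
-- Pre_ excludes findings in which some element lacks a "severity" or "path" key: there A raises KeyError
-- except when both any() scans short-circuit before the defective element (then A returns but B raises).
def Pre_build_risk_summary_py (findings : List (List (String × String))) (overall : String) : Prop :=
  ∀ f ∈ findings, (f.lookup "severity").isSome ∧ (f.lookup "path").isSome
instance (findings : List (List (String × String))) (overall : String) : Decidable (Pre_build_risk_summary_py findings overall) := by unfold Pre_build_risk_summary_py; infer_instance
def pvWitness_build_risk_summary_py : (List (List (String × String))) × String :=
  ([[("severity", "Critical"), ("path", "/x/.git")]], "High")

def Spec_build_risk_summary_py (findings : List (List (String × String))) (overall : String) (out : String) : Prop := out = build_risk_summary_py_alt findings overall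
instance (findings : List (List (String × String))) (overall : String) (out : String) : Decidable (Spec_build_risk_summary_py findings overall out) := by unfold Spec_build_risk_summary_py; infer_instance

-- ===== CLAIM (what is proved, stated in full; the proofs are below) =====
def Claim_equal_build_risk_summary_py : Prop := ∀ (findings : List (List (String × String))) (overall : String), Dom_build_risk_summary_py findings overall → Pre_build_risk_summary_py findings overall → Spec_build_risk_summary_py findings overall (build_risk_summary_py findings overall)

-- ===== LEMMAS AND PROOFS =====

-- loop invariant of B's single pass, relating the fold state to A's four scans
lemma pvFold_inv (fs : List (List (String × String))) :
    ∀ (nc nh : Int) (names : List String) (g e : Bool), names.length ≤ 3 →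
    fs.foldl pvStep (nc, nh, names, g, e) =
      (nc + ((fs.filter (fun f => pvGet f "severity" == "Critical")).length : Int),
       nh + ((fs.filter (fun f => pvGet f "severity" == "High")).length : Int),
       (names ++ (fs.filter (fun f => pvGet f "severity" == "Critical")).map (fun f => pvGet f "path")).take 3,
       g || fs.any (fun f => PySem.Str.isIn "/.git" (pvGet f "path")),
       e || fs.any (fun f => PySem.Str.isIn "/.env" (pvGet f "path"))) := by
  induction fs with
  | nil =>
    intro nc nh names g e h
    simp [List.take_of_length_le h]
  | cons f fs ih =>
    intro nc nh names g e h
    rw [List.foldl_cons]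
    by_cases hc : pvGet f "severity" == "Critical"
    · have hne : (pvGet f "severity" == "High") = false := by
        have : pvGet f "severity" = "Critical" := by simpa using hc
        simp [this]
      by_cases hlen : names.length < 3
      · rw [show pvStep (nc, nh, names, g, e) f =
              (nc + 1, nh, names ++ [pvGet f "path"],
               g || PySem.Str.isIn "/.git" (pvGet f "path"),
               e || PySem.Str.isIn "/.env" (pvGet f "path")) by
            simp [pvStep, hc, hlen]]
        rw [ih _ _ _ _ _ (by simp; omega)]
        simp [hc, hne, List.any_cons, Bool.or_assoc, List.append_assoc]
        try omega
      · have hlen3 : names.length = 3 := by omega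
        rw [show pvStep (nc, nh, names, g, e) f =
              (nc + 1, nh, names,
               g || PySem.Str.isIn "/.git" (pvGet f "path"),
               e || PySem.Str.isIn "/.env" (pvGet f "path")) by
            simp [pvStep, hc, hlen]]
        rw [ih _ _ _ _ _ h]
        simp [hc, hne, List.any_cons, Bool.or_assoc]
        constructor
        · omega
        · rw [List.take_append_of_le_length (by omega), List.take_append_of_le_length (by omega)]
    · have hstep : pvStep (nc, nh, names, g, e) f =
          (nc, (if pvGet f "severity" == "High" then nh + 1 else nh), names,
           g || PySem.Str.isIn "/.git" (pvGet f "path"),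
           e || PySem.Str.isIn "/.env" (pvGet f "path")) := by
        by_cases hh : pvGet f "severity" == "High" <;> simp [pvStep, hc, hh]
      rw [hstep, ih _ _ _ _ _ h]
      by_cases hh : pvGet f "severity" == "High" <;>
        simp [hc, hh, List.any_cons, Bool.or_assoc] <;> omega

-- ===== VERDICT (by name: the statement is the Claim_ definition above) =====
theorem build_risk_summary_py_spec : Claim_equal_build_risk_summary_py := by
  intro findings overall _ _
  unfold Spec_build_risk_summary_py build_risk_summary_py build_risk_summary_py_alt
  by_cases hemp : findings.isEmpty
  · simp [hemp]
  · simp only [hemp, Bool.false_eq_true, if_false]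
    rw [pvFold_inv findings 0 0 [] false false (by simp)]
    simp only [Int.zero_add, List.nil_append, Bool.false_or]
    have hcrit : ((List.filter (fun f => pvGet f "severity" == "Critical") findings).length : Int) ≠ 0 ↔
        ¬ (List.filter (fun f => pvGet f "severity" == "Critical") findings).isEmpty := by
      simp
    have hhigh : ((List.filter (fun f => pvGet f "severity" == "High") findings).length : Int) ≠ 0 ↔
        ¬ (List.filter (fun f => pvGet f "severity" == "High") findings).isEmpty := by
      simp
    have hnames : ((List.filter (fun f => pvGet f "severity" == "Critical") findings).map (fun f => pvGet f "path")).take 3 =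
        (PySem.List.slice (List.filter (fun f => pvGet f "severity" == "Critical") findings) none (some 3)).map (fun f => pvGet f "path") := by
      rw [show (3 : Int) = ((3 : Nat) : Int) by norm_num, PySem.List.slice_to_natCast, List.map_take]
    rw [hnames]
    by_cases hc : (List.filter (fun f => pvGet f "severity" == "Critical") findings).isEmpty <;>
    by_cases hh : (List.filter (fun f => pvGet f "severity" == "High") findings).isEmpty <;>
      simp [hc, hh, hcrit, hhigh]
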